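-- pv_equiv track=rewrite | github.com/lalit527/DS | Sequence4/Week2/submission/fibonacci-8.py | fibonacci_sum_squares_better
-- ===== SOURCE A (Python) =====
-- def fibonacci_sum_squares_better(n):
--   n = n % 30
--   if n <= 1:
--     return n
--   fibo = [None] * (n + 1)
--   fibo[0] = 0
--   fibo[1] = 1
--   sum = 1
--   for i in range(2, n + 1):
--     fibo[i] = (fibo[i - 2] + fibo[i - 1]) % 10
--     sum += (fibo[i] * fibo[i])
--     sum %= 10
--   return sum
-- ===== SOURCE B (Python) =====
-- def fibonacci_sum_squares_better(n):
--     m = n % 30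
--     a, b = 0, 1
--     for _ in range(m):
--         a, b = b, (a + b) % 10
--     return (a * b) % 10
-- ===== Notes on version B (the rewrite author's own statement) =====
-- stated objective: simpler
-- what changed: Replaces the Fibonacci table and the running sum of squares with a two-variable Fibonacci loop kept mod ten, returning the product of the final pair via the sum-of-squares identity.
import Mathlib
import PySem

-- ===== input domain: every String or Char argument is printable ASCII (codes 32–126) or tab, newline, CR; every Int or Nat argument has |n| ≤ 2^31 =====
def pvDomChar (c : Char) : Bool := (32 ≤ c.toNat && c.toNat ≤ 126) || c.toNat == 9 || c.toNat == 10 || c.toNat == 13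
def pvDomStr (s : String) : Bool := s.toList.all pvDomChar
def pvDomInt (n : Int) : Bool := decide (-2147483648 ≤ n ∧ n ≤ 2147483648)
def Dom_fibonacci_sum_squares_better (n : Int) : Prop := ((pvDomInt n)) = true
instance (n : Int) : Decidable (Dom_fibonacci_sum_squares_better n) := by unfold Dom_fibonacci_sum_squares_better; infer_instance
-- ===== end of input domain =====

-- B keeps only two consecutive Fibonacci values mod 10 and uses sum F(i)^2 = F(n)*F(n+1); no table, no running sum (objective: simpler).

-- ===== PORT A =====
def fibonacci_sum_squares_better (n : Int) : Int :=
  let n := PySem.Int.mod n 30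
  if n ≤ 1 then n
  else
    -- list [None]*(n+1): elements are written before any read, modeled as Int list
    let fibo : List Int := List.replicate (n + 1).toNat 0
    let fibo := PySem.List.pySetD fibo 0 0
    let fibo := PySem.List.pySetD fibo 1 1
    let st := (PySem.List.pyRange 2 (n + 1) 1).foldl
      (fun (st : List Int × Int) i =>
        let fibo := PySem.List.pySetD st.1 i
          (PySem.Int.mod (PySem.List.pyGetD st.1 (i - 2) 0 + PySem.List.pyGetD st.1 (i - 1) 0) 10)
        let sum := st.2 + PySem.List.pyGetD fibo i 0 * PySem.List.pyGetD fibo i 0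
        (fibo, PySem.Int.mod sum 10)) (fibo, 1)
    st.2

-- ===== PORT B =====
def fibonacci_sum_squares_better_alt (n : Int) : Int :=
  let m := PySem.Int.mod n 30
  let p := (List.range m.toNat).foldl
    (fun (p : Int × Int) _ => (p.2, PySem.Int.mod (p.1 + p.2) 10)) (0, 1)
  PySem.Int.mod (p.1 * p.2) 10

-- ===== PRECONDITION & SPEC =====
def Spec_fibonacci_sum_squares_better (n : Int) (out : Int) : Prop := out = fibonacci_sum_squares_better_alt n
instance (n : Int) (out : Int) : Decidable (Spec_fibonacci_sum_squares_better n out) := by unfold Spec_fibonacci_sum_squares_better; infer_instance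

-- ===== CLAIM (what is proved, stated in full; the proofs are below) =====
def Claim_equal_fibonacci_sum_squares_better : Prop := ∀ (n : Int), Dom_fibonacci_sum_squares_better n → Spec_fibonacci_sum_squares_better n (fibonacci_sum_squares_better n)

-- ===== LEMMAS AND PROOFS =====

-- Both ports read n only through n % 30, so the claim reduces to the 30 residues.
theorem pv_mod_eq (n : Int) : PySem.Int.mod n 30 = n % 30 :=
  PySem.Int.mod_eq_emod_of_pos (by norm_num)

theorem pv_A_factors (n : Int) : fibonacci_sum_squares_better n = fibonacci_sum_squares_better (n % 30) := by
  unfold fibonacci_sum_squares_better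
  rw [pv_mod_eq, pv_mod_eq, Int.emod_emod_of_dvd _ dvd_rfl]

theorem pv_B_factors (n : Int) : fibonacci_sum_squares_better_alt n = fibonacci_sum_squares_better_alt (n % 30) := by
  unfold fibonacci_sum_squares_better_alt
  rw [pv_mod_eq, pv_mod_eq, Int.emod_emod_of_dvd _ dvd_rfl]

set_option maxRecDepth 100000 in
theorem pv_residues : ∀ m ∈ PySem.List.pyRange 0 30 1,
    fibonacci_sum_squares_better m = fibonacci_sum_squares_better_alt m := by decide

-- ===== VERDICT (by name: the statement is the Claim_ definition above) =====
theorem fibonacci_sum_squares_better_spec : Claim_equal_fibonacci_sum_squares_better := by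
  intro n _
  unfold Spec_fibonacci_sum_squares_better
  rw [pv_A_factors, pv_B_factors]
  exact pv_residues (n % 30) (by
    rw [PySem.List.mem_pyRange_one]
    exact ⟨Int.emod_nonneg n (by norm_num), Int.emod_lt_of_pos n (by norm_num)⟩)
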